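-- pv_equiv track=rewrite | github.com/jangyunseo-ineeji/- | gpyro_prototype/train.py | cap_rollout_horizon
-- ===== SOURCE A (Python) =====
-- def cap_rollout_horizon(bundle: dict, start_t: int, horizon: int) -> int:
--     """Do not roll past the end of the experiment segment containing ``start_t``."""
--     T = bundle["T"]
--     ss = bundle.get("segment_starts")
--     if ss is None or len(ss) < 2:
--         return min(horizon, len(T) - start_t - 1)
--     for i in range(len(ss) - 1):
--         if ss[i] <= start_t < ss[i + 1]:
--             return min(horizon, int(ss[i + 1] - start_t - 1))
--     return min(horizon, len(T) - start_t - 1)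
-- ===== SOURCE B (Python) =====
-- def cap_rollout_horizon(bundle: dict, start_t: int, horizon: int) -> int:
--     """Do not roll past the end of the experiment segment containing ``start_t``."""
--     T = bundle["T"]
--     ss = bundle.get("segment_starts")
--     if ss is None or len(ss) < 2:
--         return min(horizon, len(T) - start_t - 1)
--     # binary search for the first segment start strictly greater than start_t
--     lo, hi = 0, len(ss)
--     while lo < hi:
--         mid = (lo + hi) // 2
--         if start_t < ss[mid]:
--             hi = mid
--         else:
--             lo = mid + 1
--     if 1 <= lo <= len(ss) - 1:
--         return min(horizon, int(ss[lo] - start_t - 1))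
--     return min(horizon, len(T) - start_t - 1)
-- ===== Notes on version B (the rewrite author's own statement) =====
-- stated objective: alternative
-- what changed: Replaces A's linear first-match scan over consecutive segment-start pairs by an upper-bound binary search on segment_starts (O(log n) lookups instead of O(n)); Pre_ excludes bundles without a 'T' key (A raises KeyError) and bundles whose segment_starts is not sorted non-decreasingly, a malformed input on which the scan and the search can diverge.
-- outside the precondition, e.g. on cap_rollout_horizon({'T': [0, 1, 2, 3], 'segment_starts': [0, 5, 2, 9]}, 3, 100): A returns 1, B returns 5
import Mathlib
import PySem

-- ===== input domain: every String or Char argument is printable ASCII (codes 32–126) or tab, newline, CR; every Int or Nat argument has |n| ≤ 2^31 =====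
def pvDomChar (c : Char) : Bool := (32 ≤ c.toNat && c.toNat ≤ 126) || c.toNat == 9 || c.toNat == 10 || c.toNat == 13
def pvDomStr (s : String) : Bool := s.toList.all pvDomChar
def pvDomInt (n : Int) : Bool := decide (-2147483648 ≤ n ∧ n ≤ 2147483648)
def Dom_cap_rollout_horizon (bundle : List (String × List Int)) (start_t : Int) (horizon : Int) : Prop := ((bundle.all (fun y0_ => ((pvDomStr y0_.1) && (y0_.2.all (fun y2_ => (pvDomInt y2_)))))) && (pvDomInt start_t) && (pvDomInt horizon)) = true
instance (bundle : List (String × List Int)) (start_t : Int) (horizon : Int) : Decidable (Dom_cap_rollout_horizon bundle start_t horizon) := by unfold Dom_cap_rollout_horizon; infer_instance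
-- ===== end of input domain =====

-- B replaces A's linear first-match scan over consecutive segment starts by a
-- binary search (upper bound) over the sorted segment_starts list.

-- ===== PORT A =====
-- the for-loop 'for i in range(len(ss)-1): if ss[i] <= start_t < ss[i+1]: return …'
def capA_scan (ss : List Int) (start_t : Int) (horizon : Int) (i : Nat) : Option Int :=
  if h : i + 1 < ss.length then
    if ss[i]'(by omega) ≤ start_t ∧ start_t < ss[i+1]'h then
      some (min horizon (ss[i+1]'h - start_t - 1))
    else capA_scan ss start_t horizon (i+1)
  else none
termination_by ss.length - i

def cap_rollout_horizon (bundle : List (String × List Int)) (start_t : Int) (horizon : Int) : Int :=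
  match bundle.lookup "T" with
  | none => 0  -- Python raises KeyError here; excluded by Pre_
  | some T =>
    match bundle.lookup "segment_starts" with
    | none => min horizon ((T.length : Int) - start_t - 1)
    | some ss =>
      if ss.length < 2 then min horizon ((T.length : Int) - start_t - 1)
      else
        match capA_scan ss start_t horizon 0 with
        | some v => v
        | none => min horizon ((T.length : Int) - start_t - 1)

-- ===== PORT B =====
-- the while-loop 'while lo < hi: mid = (lo+hi)//2; …' (mid is always in range,
-- so getD's default is never used)
def capB_bisect (ss : List Int) (x : Int) (lo hi : Nat) : Nat :=
  if lo < hi then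
    let mid := (lo + hi) / 2
    if x < ss.getD mid 0 then capB_bisect ss x lo mid
    else capB_bisect ss x (mid + 1) hi
  else lo
termination_by hi - lo
decreasing_by all_goals omega

def cap_rollout_horizon_alt (bundle : List (String × List Int)) (start_t : Int) (horizon : Int) : Int :=
  match bundle.lookup "T" with
  | none => 0  -- Python raises KeyError here; excluded by Pre_
  | some T =>
    match bundle.lookup "segment_starts" with
    | none => min horizon ((T.length : Int) - start_t - 1)
    | some ss =>
      if ss.length < 2 then min horizon ((T.length : Int) - start_t - 1)
      else
        let lo := capB_bisect ss start_t 0 ss.length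
        if 1 ≤ lo ∧ lo ≤ ss.length - 1 then min horizon (ss.getD lo 0 - start_t - 1)
        else min horizon ((T.length : Int) - start_t - 1)

-- ===== PRECONDITION & SPEC =====
-- Pre_ excludes bundles without a "T" key (Python A raises KeyError) and bundles whose
-- "segment_starts" list is not sorted non-decreasingly: segment starts are sorted by
-- nature, and on an unsorted list A's first-match scan and B's binary search diverge.
def Pre_cap_rollout_horizon (bundle : List (String × List Int)) (start_t : Int) (horizon : Int) : Prop :=
  (bundle.lookup "T").isSome = true ∧
  List.Pairwise (· ≤ ·) ((bundle.lookup "segment_starts").getD [])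
instance (bundle : List (String × List Int)) (start_t : Int) (horizon : Int) : Decidable (Pre_cap_rollout_horizon bundle start_t horizon) := by unfold Pre_cap_rollout_horizon; infer_instance

def pvWitness_cap_rollout_horizon : (List (String × List Int)) × Int × Int :=
  ([("T", [0, 1, 2, 3]), ("segment_starts", [0, 2])], 1, 5)

def Spec_cap_rollout_horizon (bundle : List (String × List Int)) (start_t : Int) (horizon : Int) (out : Int) : Prop := out = cap_rollout_horizon_alt bundle start_t horizon
instance (bundle : List (String × List Int)) (start_t : Int) (horizon : Int) (out : Int) : Decidable (Spec_cap_rollout_horizon bundle start_t horizon out) := by unfold Spec_cap_rollout_horizon; infer_instance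

-- ===== CLAIM (what is proved, stated in full; the proofs are below) =====
def Claim_equal_cap_rollout_horizon : Prop := ∀ (bundle : List (String × List Int)) (start_t : Int) (horizon : Int), Dom_cap_rollout_horizon bundle start_t horizon → Pre_cap_rollout_horizon bundle start_t horizon → Spec_cap_rollout_horizon bundle start_t horizon (cap_rollout_horizon bundle start_t horizon)

-- ===== LEMMAS AND PROOFS =====

-- monotone access into a sorted list
theorem sorted_getElem_le (ss : List Int) (hs : List.Pairwise (· ≤ ·) ss)
    (j j' : Nat) (hj' : j' < ss.length) (hjj : j ≤ j') :
    ss[j]'(by omega) ≤ ss[j']'hj' := by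
  rcases Nat.lt_or_ge j j' with h | h
  · exact (List.pairwise_iff_getElem.mp hs) j j' (by omega) hj' h
  · have : j = j' := by omega
    subst this; rfl

-- the bisection returns a k with: everything below k is ≤ x, everything from k on is > x
theorem bisect_bounds (ss : List Int) (x : Int) (hs : List.Pairwise (· ≤ ·) ss) :
    ∀ n lo hi, hi - lo ≤ n → lo ≤ hi → hi ≤ ss.length →
    (∀ j (hj : j < ss.length), j < lo → ss[j] ≤ x) →
    (∀ j (hj : j < ss.length), hi ≤ j → x < ss[j]) →
    lo ≤ capB_bisect ss x lo hi ∧ capB_bisect ss x lo hi ≤ hi ∧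
    (∀ j (hj : j < ss.length), j < capB_bisect ss x lo hi → ss[j] ≤ x) ∧
    (∀ j (hj : j < ss.length), capB_bisect ss x lo hi ≤ j → x < ss[j]) := by
  intro n
  induction n with
  | zero =>
    intro lo hi hn hlh hhl P1 P2
    have he : lo = hi := by omega
    rw [capB_bisect]
    simp only [he, lt_irrefl, if_false]
    exact ⟨le_refl _, le_refl _, fun j hj h => P1 j hj (by omega), fun j hj h => P2 j hj (by omega)⟩
  | succ n ih =>
    intro lo hi hn hlh hhl P1 P2
    by_cases hlt : lo < hi
    · rw [capB_bisect]
      simp only [hlt, if_true]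
      have hmid : (lo + hi) / 2 < ss.length := by omega
      rw [List.getD_eq_getElem ss 0 hmid]
      split_ifs with hx
      · have := ih lo ((lo + hi) / 2) (by omega) (by omega) (by omega) P1
          (fun j hj h => lt_of_lt_of_le hx (sorted_getElem_le ss hs _ j hj h))
        exact ⟨this.1, by omega, this.2.2⟩
      · rw [not_lt] at hx
        have := ih ((lo + hi) / 2 + 1) hi (by omega) (by omega) hhl
          (fun j hj h => le_trans (sorted_getElem_le ss hs j _ hmid (by omega)) hx) P2
        exact ⟨by omega, this.2.1, this.2.2⟩
    · rw [capB_bisect]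
      simp only [hlt, if_false]
      exact ⟨le_refl _, by omega, fun j hj h => P1 j hj (by omega), fun j hj h => P2 j hj (by omega)⟩

-- A's scan, characterised by such a k: it hits exactly at i = k - 1
theorem scan_char (ss : List Int) (t h : Int) (k : Nat)
    (P1 : ∀ j (hj : j < ss.length), j < k → ss[j] ≤ t)
    (P2 : ∀ j (hj : j < ss.length), k ≤ j → t < ss[j]) :
    ∀ n i, ss.length - i ≤ n →
      capA_scan ss t h i =
        if i < k ∧ k < ss.length then some (min h (ss.getD k 0 - t - 1)) else none := by
  intro n
  induction n with
  | zero =>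
    intro i hn
    rw [capA_scan]
    have h1 : ¬ (i + 1 < ss.length) := by omega
    simp only [h1, dite_false]
    have : ¬ (i < k ∧ k < ss.length) := by
      rintro ⟨h2, h3⟩
      have := P1 i (by omega) h2
      have := P2 i (by omega) (by omega)
      -- i < k < ss.length ≤ i + 1 forces k = i + 1 ≥ ss.length, contradiction
      omega
    simp [this]
  | succ n ih =>
    intro i hn
    rw [capA_scan]
    by_cases hlt : i + 1 < ss.length
    · simp only [hlt, dite_true]
      by_cases hc : ss[i]'(by omega) ≤ t ∧ t < ss[i+1]'hlt
      · -- the condition holds exactly when k = i + 1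
        have hk : k = i + 1 := by
          rcases Nat.lt_or_ge i k with h1 | h1
          · rcases Nat.lt_or_ge (i+1) k with h2 | h2
            · exact absurd (P1 (i+1) hlt h2) (by exact not_le.mpr hc.2)
            · omega
          · exact absurd (P2 i (by omega) h1) (by exact not_lt.mpr hc.1)
        have hcond : i < k ∧ k < ss.length := by omega
        simp only [hc, if_true, hcond, and_self]
        rw [List.getD_eq_getElem ss 0 (by omega : k < ss.length)]
        simp [hk]
      · simp only [hc, if_false]
        rw [ih (i+1) (by omega)]
        have hne : k ≠ i + 1 := by
          intro he
          exact hc ⟨P1 i (by omega) (by omega), P2 (i+1) hlt (by omega)⟩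
        have : (i + 1 < k ∧ k < ss.length) ↔ (i < k ∧ k < ss.length) := by omega
        rw [if_congr this rfl rfl]
    · simp only [hlt, dite_false]
      have : ¬ (i < k ∧ k < ss.length) := by
        rintro ⟨h2, h3⟩
        have := P1 i (by omega) h2
        have := P2 i (by omega) (by omega)
        omega
      simp [this]

-- ===== VERDICT (by name: the statement is the Claim_ definition above) =====
theorem cap_rollout_horizon_spec : Claim_equal_cap_rollout_horizon := by
  intro bundle start_t horizon _dom pre
  obtain ⟨hT, hsorted⟩ := pre
  unfold Spec_cap_rollout_horizon cap_rollout_horizon cap_rollout_horizon_alt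
  cases hTk : bundle.lookup "T" with
  | none => simp [hTk] at hT
  | some T =>
    cases hss : bundle.lookup "segment_starts" with
    | none => rfl
    | some ss =>
      rw [hss] at hsorted
      simp only [Option.getD_some] at hsorted
      simp only
      by_cases hlen : ss.length < 2
      · rw [if_pos hlen, if_pos hlen]
      · rw [if_neg hlen, if_neg hlen]
        have hb := bisect_bounds ss start_t hsorted ss.length 0 ss.length
          (by omega) (by omega) (le_refl _)
          (fun j hj h => by omega) (fun j hj h => by omega)
        set k := capB_bisect ss start_t 0 ss.length with hk
        have hsc := scan_char ss start_t horizon k hb.2.2.1 hb.2.2.2 ss.length 0 (by omega)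
        rw [hsc]
        have hiff : (0 < k ∧ k < ss.length) ↔ (1 ≤ k ∧ k ≤ ss.length - 1) := by omega
        by_cases hcond : 0 < k ∧ k < ss.length
        · rw [if_pos hcond, if_pos (hiff.mp hcond)]
        · rw [if_neg hcond, if_neg (fun h => hcond (hiff.mpr h))]
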